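-- pv_equiv track=rewrite | github.com/queelius/computational-explorations | src/universal_patterns.py | stanley_sequence
-- ===== SOURCE A (Python) =====
-- from typing import List, Tuple, Dict, Any, Optional, Set
--
-- def stanley_sequence(n: int) -> List[int]:
--     """Compute the Stanley sequence S(0, n): starting from {0, n}, greedily add
--     integers that create no 3-term arithmetic progression.
--
--     Growth: |S(0,n) cap [0,N]| ~ N^{log2/log3}.
--     """
--     seq = [0, n]
--     forbidden = set()
--     # Precompute forbidden: for each pair (a,b), the third term of a 3-AP is 2b-a or 2a-b
--     for a in seq:
--         for b in seq:
--             if a != b: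
--                 forbidden.add(2 * b - a)
--
--     for candidate in range(n + 1, 10 * n + 1):
--         if candidate in forbidden:
--             continue
--         # Check no 3-AP with existing
--         ok = True
--         for a in seq:
--             # candidate, a, x in AP => x = 2*a - candidate (already in seq?)
--             # a, candidate, x in AP => x = 2*candidate - a
--             # x, a, candidate in AP => x = 2*a - candidate
--             mid_val = (candidate + a)
--             if mid_val % 2 == 0 and mid_val // 2 in set(seq):
--                 ok = False
--                 break
--         if ok:
--             seq.append(candidate)
--             # Update forbidden
--             for a in seq[:-1]:
--                 forbidden.add(2 * candidate - a)
--                 forbidden.add(2 * a - candidate)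
--
--     return seq
-- ===== SOURCE B (Python) =====
-- def stanley_sequence(n: int) -> list[int]:
--     """Compute the Stanley sequence S(0, n) with a pure incremental sieve:
--     a candidate c is acceptable iff it is not a forbidden reflection 2*b - a
--     of an earlier pair, so no per-candidate rescan of seq is needed."""
--     seq = [0, n]
--     forbidden = {2 * n, -n}
--     for c in range(n + 1, 10 * n + 1):
--         if c in forbidden:
--             continue
--         for a in seq:
--             forbidden.add(2 * c - a)
--             forbidden.add(2 * a - c)
--         seq.append(c)
--     return seq
-- ===== Notes on version B (the rewrite author's own statement) =====
-- stated objective: faster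
-- what changed: B drops A's per-candidate midpoint rescan of seq (which rebuilt set(seq) inside an inner loop) entirely and decides acceptance by a single membership test in the incrementally maintained forbidden set, which provably already contains every midpoint reflection.
import Mathlib
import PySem

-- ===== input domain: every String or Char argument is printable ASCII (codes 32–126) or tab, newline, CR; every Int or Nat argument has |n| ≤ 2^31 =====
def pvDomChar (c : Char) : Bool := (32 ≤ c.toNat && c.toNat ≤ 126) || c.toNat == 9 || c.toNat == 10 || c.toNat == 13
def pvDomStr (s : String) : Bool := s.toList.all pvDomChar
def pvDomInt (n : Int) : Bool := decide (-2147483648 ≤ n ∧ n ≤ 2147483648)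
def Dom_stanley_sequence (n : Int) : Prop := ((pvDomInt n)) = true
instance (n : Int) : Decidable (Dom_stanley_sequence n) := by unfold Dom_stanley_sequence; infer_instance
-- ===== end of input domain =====

-- B replaces A's per-candidate midpoint rescan of seq by a single lookup in the
-- incrementally maintained forbidden set (measured faster).

-- ===== PORT A =====
-- body of A's candidate loop: skip if forbidden, else scan seq for a midpoint, else append+update
def pvStepA (st : List Int × PySem.Set Int) (candidate : Int) : List Int × PySem.Set Int :=
  let seq := st.1
  let forbidden := st.2
  if PySem.Set.contains forbidden candidate then st
  else
    -- ok-scan with break = List.any negated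
    let ok := !(seq.any (fun a =>
      let mid_val := candidate + a
      decide (PySem.Int.mod mid_val 2 = 0) &&
        PySem.Set.contains (PySem.Set.ofList seq) (PySem.Int.floordiv mid_val 2)))
    if ok then
      let seq2 := seq ++ [candidate]
      let forbidden2 := (PySem.List.slice seq2 none (some (-1))).foldl
        (fun f a => PySem.Set.add (PySem.Set.add f (2 * candidate - a)) (2 * a - candidate))
        forbidden
      (seq2, forbidden2)
    else st

def stanley_sequence (n : Int) : List Int :=
  let seq : List Int := [0, n]
  -- precompute forbidden: double loop over pairs (a, b), a != b
  let forbidden : PySem.Set Int := seq.foldl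
    (fun f a => seq.foldl (fun f b => if a ≠ b then PySem.Set.add f (2 * b - a) else f) f)
    PySem.Set.empty
  ((PySem.List.pyRange (n + 1) (10 * n + 1) 1).foldl pvStepA (seq, forbidden)).1

-- ===== PORT B =====
def pvStepB (st : List Int × PySem.Set Int) (c : Int) : List Int × PySem.Set Int :=
  let seq := st.1
  let forbidden := st.2
  if PySem.Set.contains forbidden c then st
  else
    let forbidden2 := seq.foldl
      (fun f a => PySem.Set.add (PySem.Set.add f (2 * c - a)) (2 * a - c)) forbidden
    (seq ++ [c], forbidden2)

def stanley_sequence_alt (n : Int) : List Int :=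
  let seq : List Int := [0, n]
  let forbidden : PySem.Set Int := PySem.Set.ofList [2 * n, -n]
  ((PySem.List.pyRange (n + 1) (10 * n + 1) 1).foldl pvStepB (seq, forbidden)).1

-- ===== PRECONDITION & SPEC =====
def Spec_stanley_sequence (n : Int) (out : List Int) : Prop := out = stanley_sequence_alt n
instance (n : Int) (out : List Int) : Decidable (Spec_stanley_sequence n out) := by unfold Spec_stanley_sequence; infer_instance

-- ===== CLAIM (what is proved, stated in full; the proofs are below) =====
def Claim_equal_stanley_sequence : Prop := ∀ (n : Int), Dom_stanley_sequence n → Spec_stanley_sequence n (stanley_sequence n)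

-- ===== LEMMAS AND PROOFS =====

-- loop invariant: every element of seq is below the next candidate, and forbidden
-- contains every reflection 2*m - a of a pair of distinct elements of seq
def pvInv (seq : List Int) (forb : PySem.Set Int) (c : Int) : Prop :=
  (∀ x ∈ seq, x < c) ∧ (∀ a ∈ seq, ∀ m ∈ seq, a ≠ m → (2 * m - a) ∈ forb)

theorem pv_mem_foldl_pairs (c : Int) (seq : List Int) (forb : PySem.Set Int) (x : Int) :
    x ∈ seq.foldl (fun f a => PySem.Set.add (PySem.Set.add f (2 * c - a)) (2 * a - c)) forb ↔
      x ∈ forb ∨ ∃ a ∈ seq, x = 2 * c - a ∨ x = 2 * a - c := by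
  induction seq generalizing forb with
  | nil => simp
  | cons h t ih =>
      simp only [List.foldl_cons, ih, PySem.Set.mem_add, List.mem_cons]
      constructor
      · rintro (((hx | hx) | hx) | ⟨a, ha, hx⟩)
        · exact Or.inl hx
        · exact Or.inr ⟨h, Or.inl rfl, Or.inl hx⟩
        · exact Or.inr ⟨h, Or.inl rfl, Or.inr hx⟩
        · exact Or.inr ⟨a, Or.inr ha, hx⟩
      · rintro (hx | ⟨a, (rfl | ha), hx⟩)
        · exact Or.inl (Or.inl (Or.inl hx))
        · rcases hx with hx | hx
          · exact Or.inl (Or.inl (Or.inr hx))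
          · exact Or.inl (Or.inr hx)
        · exact Or.inr ⟨a, ha, hx⟩

theorem pv_step_eq (st : List Int × PySem.Set Int) (c : Int) (hInv : pvInv st.1 st.2 c) :
    pvStepA st c = pvStepB st c ∧ pvInv (pvStepB st c).1 (pvStepB st c).2 (c + 1) := by
  obtain ⟨seq, forb⟩ := st
  obtain ⟨hlt, hcl⟩ := hInv
  by_cases hc : c ∈ forb
  · have hb : pvStepB (seq, forb) c = (seq, forb) := by simp [pvStepB, hc]
    have ha : pvStepA (seq, forb) c = (seq, forb) := by simp [pvStepA, hc]
    refine ⟨ha.trans hb.symm, ?_⟩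
    rw [hb]
    exact ⟨fun x hx => by have := hlt x hx; omega, hcl⟩
  · -- when c is not forbidden, A's midpoint scan can never fire
    have hscan : ∀ a ∈ seq, PySem.Int.mod (c + a) 2 = 0 →
        PySem.Int.floordiv (c + a) 2 ∉ seq := by
      intro a ha hmod hmem
      set m := PySem.Int.floordiv (c + a) 2 with hmdef
      have hca : c + a = 2 * m := by
        rw [PySem.Int.mod_eq_emod_of_pos (by norm_num)] at hmod
        rw [PySem.Int.floordiv_eq_ediv_of_pos (by norm_num)] at hmdef
        omega
      have ham : a ≠ m := by
        intro h
        have hac : c = a := by omega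
        have := hlt a ha
        omega
      exact hc (by have : c = 2 * m - a := by omega
                   exact this ▸ hcl a ha m hmem ham)
    have hb : pvStepB (seq, forb) c = (seq ++ [c],
        seq.foldl (fun f a => PySem.Set.add (PySem.Set.add f (2 * c - a)) (2 * a - c)) forb) := by
      simp [pvStepB, hc]
    have ha : pvStepA (seq, forb) c = (seq ++ [c],
        seq.foldl (fun f a => PySem.Set.add (PySem.Set.add f (2 * c - a)) (2 * a - c)) forb) := by
      simp only [pvStepA]
      split_ifs with h1 h2
      · exfalso
        simp only [PySem.Set.contains_eq_listContains, List.contains_eq_mem,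
          decide_eq_true_eq] at h1
        exact hc h1
      · rw [PySem.List.slice_to_neg_one, List.dropLast_concat]
      · exfalso
        simp only [Bool.not_eq_true', List.any_eq_false, Bool.and_eq_false_iff,
          decide_eq_false_iff_not, PySem.Set.contains_eq_listContains,
          List.contains_eq_mem, Bool.not_eq_true] at h2
        push Not at h2
        obtain ⟨a, ha', hmod, hmem⟩ := h2
        simp only [PySem.Set.mem_ofList] at hmem
        exact hscan a ha' hmod hmem
    refine ⟨ha.trans hb.symm, ?_⟩
    rw [hb]
    constructor
    · intro x hx
      rcases List.mem_append.mp hx with hx | hx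
      · have := hlt x hx; omega
      · simp only [List.mem_singleton] at hx; omega
    · intro a ha' m hm ham
      rw [pv_mem_foldl_pairs]
      rcases List.mem_append.mp ha' with ha1 | ha1 <;> rcases List.mem_append.mp hm with hm1 | hm1
      · exact Or.inl (hcl a ha1 m hm1 ham)
      · simp only [List.mem_singleton] at hm1
        subst hm1
        exact Or.inr ⟨a, ha1, Or.inl rfl⟩
      · simp only [List.mem_singleton] at ha1
        subst ha1
        exact Or.inr ⟨m, hm1, Or.inr rfl⟩
      · simp only [List.mem_singleton] at ha1 hm1
        exact absurd (ha1.trans hm1.symm) ham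

theorem pv_foldl_eq (k : Nat) : ∀ (a b : Int), (b - a).toNat = k →
    ∀ (st : List Int × PySem.Set Int), pvInv st.1 st.2 a →
    (PySem.List.pyRange a b 1).foldl pvStepA st = (PySem.List.pyRange a b 1).foldl pvStepB st := by
  induction k with
  | zero =>
      intro a b hk st _
      rw [PySem.List.pyRange_one_eq_nil (by omega)]
      rfl
  | succ k ih =>
      intro a b hk st hInv
      rw [PySem.List.pyRange_one_cons (by omega)]
      obtain ⟨heq, hInv'⟩ := pv_step_eq st a hInv
      simp only [List.foldl_cons, heq]
      exact ih (a + 1) b (by omega) (pvStepB st a) hInv'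

theorem pv_init_forbidden (n : Int) (hn : 0 < n) :
    ([0, n] : List Int).foldl
      (fun f a => ([0, n] : List Int).foldl
        (fun f b => if a ≠ b then PySem.Set.add f (2 * b - a) else f) f)
      PySem.Set.empty = PySem.Set.ofList [2 * n, -n] := by
  have h0 : (0 : Int) ≠ n := by omega
  simp [PySem.Set.ofList, PySem.Set.add, PySem.Set.empty, h0, h0.symm,
    PySem.Set.contains_eq_listContains, List.contains_eq_mem]

-- ===== VERDICT (by name: the statement is the Claim_ definition above) =====
theorem stanley_sequence_spec : Claim_equal_stanley_sequence := by
  intro n _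
  unfold Spec_stanley_sequence stanley_sequence stanley_sequence_alt
  by_cases hn : n ≤ 0
  · rw [PySem.List.pyRange_one_eq_nil (by omega)]
    rfl
  · replace hn : 0 < n := by omega
    show (List.foldl pvStepA ([0, n],
        List.foldl (fun f a => List.foldl
          (fun f b => if a ≠ b then PySem.Set.add f (2 * b - a) else f) f [0, n])
          PySem.Set.empty [0, n])
        (PySem.List.pyRange (n + 1) (10 * n + 1) 1)).1 =
      (List.foldl pvStepB ([0, n], PySem.Set.ofList [2 * n, -n])
        (PySem.List.pyRange (n + 1) (10 * n + 1) 1)).1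
    rw [pv_init_forbidden n hn]
    have hInv0 : pvInv [0, n] (PySem.Set.ofList [2 * n, -n]) (n + 1) := by
      constructor
      · intro x hx
        simp only [List.mem_cons, List.not_mem_nil, or_false] at hx
        rcases hx with hx | hx <;> omega
      · intro a ha m hm ham
        simp only [List.mem_cons, List.not_mem_nil, or_false] at ha hm
        rw [PySem.Set.mem_ofList]
        rcases ha with rfl | rfl <;> rcases hm with rfl | rfl
        · exact absurd rfl ham
        · simp
        · simp
        · exact absurd rfl ham
    exact congrArg Prod.fst
      (pv_foldl_eq (10 * n + 1 - (n + 1)).toNat (n + 1) (10 * n + 1) rfl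
        ([0, n], PySem.Set.ofList [2 * n, -n]) hInv0)
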